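-- pv_equiv track=rewrite | github.com/mrunesson/stockrec | stockrec/extract.py | merge_parenthesis_tokens
-- ===== SOURCE A (Python) =====
-- from typing import List
--
-- def merge_parenthesis_tokens(tokens: List) -> List:
--     result=[]
--     holder=None
--     for t in tokens:
--         if holder is None:
--             if t[0] == '(' and t[-1] != ')':
--                 holder = t
--             else:
--                 result.append(t)
--         else:
--             if t[-1] == ')':
--                 result.append(holder + ' ' + t)
--                 holder = None
--             else:
--                 holder += ' ' + t
--     return result
-- ===== SOURCE B (Python) =====
-- def merge_parenthesis_tokens(tokens):
--     result = []
--     n = len(tokens)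
--     i = 0
--     while i < n:
--         t = tokens[i]
--         if t.startswith('(') and not t.endswith(')'):
--             j = i + 1
--             while j < n and not tokens[j].endswith(')'):
--                 j += 1
--             if j < n:
--                 result.append(' '.join(tokens[i:j + 1]))
--             i = j + 1
--         else:
--             result.append(t)
--             i += 1
--     return result
-- ===== Notes on version B (the rewrite author's own statement) =====
-- stated objective: alternative
-- what changed: Replaced the holder-string accumulator with carried state by an index-based while loop that looks ahead with a second index to find each paren group's closing token and joins the whole span at once.
import Mathlib
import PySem

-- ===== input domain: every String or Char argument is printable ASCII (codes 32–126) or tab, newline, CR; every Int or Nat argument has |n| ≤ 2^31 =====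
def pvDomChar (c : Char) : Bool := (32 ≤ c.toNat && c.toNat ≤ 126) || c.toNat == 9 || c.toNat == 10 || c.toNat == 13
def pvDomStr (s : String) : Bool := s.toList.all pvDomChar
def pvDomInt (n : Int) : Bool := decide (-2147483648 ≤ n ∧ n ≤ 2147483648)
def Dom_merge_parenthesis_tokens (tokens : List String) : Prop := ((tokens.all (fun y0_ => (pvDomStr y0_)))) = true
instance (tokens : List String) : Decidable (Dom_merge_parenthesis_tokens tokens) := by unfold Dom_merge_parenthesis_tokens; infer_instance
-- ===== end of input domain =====

-- B replaces A's carried holder/flag state by an explicit forward look-ahead that joins each paren span at once (alternative decomposition, same cost); no argument is mutated.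

-- ===== PORT A =====
-- A's loop: state = (result so far, optional holder); t[0] / t[-1] via PySem.Str.pyGet? (none = IndexError, excluded by Pre_).
def pvGoA : List String → Option String → List String → List String
  | [], _, res => res
  | t :: ts, none, res =>
      if PySem.Str.pyGet? t 0 = some '(' ∧ ¬ PySem.Str.pyGet? t (-1) = some ')' then
        pvGoA ts (some t) res
      else
        pvGoA ts none (res ++ [t])
  | t :: ts, some h, res =>
      if PySem.Str.pyGet? t (-1) = some ')' then
        pvGoA ts none (res ++ [h ++ " " ++ t])
      else
        pvGoA ts (some (h ++ " " ++ t)) res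

def merge_parenthesis_tokens (tokens : List String) : List String :=
  pvGoA tokens none []

-- ===== PORT B =====
-- B's inner while loop: scan forward for the first token ending with ')'; returns (group, remainder) or none if no closer exists.
def pvSplitClose : List String → Option (List String × List String)
  | [] => none
  | t :: ts =>
      if PySem.Str.endswith t ")" then some ([t], ts)
      else (pvSplitClose ts).map (fun p => (t :: p.1, p.2))

-- needed by pvGoB's termination proof
theorem pvSplitClose_append (ts g rest : List String)
    (h : pvSplitClose ts = some (g, rest)) : ts = g ++ rest ∧ g ≠ [] := by
  induction ts generalizing g rest with
  | nil => simp [pvSplitClose] at h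
  | cons t ts ih =>
    simp only [pvSplitClose] at h
    split at h
    · simp only [Option.some.injEq, Prod.mk.injEq] at h
      obtain ⟨hg, hr⟩ := h
      subst hg; subst hr; simp
    · cases hs : pvSplitClose ts with
      | none => simp [hs] at h
      | some p =>
        simp [hs] at h
        obtain ⟨hg, hr⟩ := h
        obtain ⟨h1, _⟩ := ih p.1 p.2 (by simp [hs])
        subst hg hr
        simp [h1]

-- B's outer while loop over the remaining tokens.
def pvGoB : List String → List String
  | [] => []
  | t :: ts =>
      if PySem.Str.startswith t "(" ∧ ¬ PySem.Str.endswith t ")" then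
        match hs : pvSplitClose ts with
        | some (g, rest) => PySem.Str.join " " (t :: g) :: pvGoB rest
        | none => []
      else t :: pvGoB ts
termination_by l => l.length
decreasing_by
  · obtain ⟨h1, _⟩ := pvSplitClose_append ts g rest hs
    have : rest.length ≤ ts.length := by subst h1; simp
    simp; omega
  · simp

def merge_parenthesis_tokens_alt (tokens : List String) : List String :=
  pvGoB tokens

-- ===== PRECONDITION & SPEC =====
-- Pre_ excludes tokens lists containing an empty string: there Python A raises IndexError (t[0] / t[-1]).
def Pre_merge_parenthesis_tokens (tokens : List String) : Prop := ∀ t ∈ tokens, t ≠ ""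
instance (tokens : List String) : Decidable (Pre_merge_parenthesis_tokens tokens) := by unfold Pre_merge_parenthesis_tokens; infer_instance
def pvWitness_merge_parenthesis_tokens : List String := ["(a", "b", "c)", "d"]

def Spec_merge_parenthesis_tokens (tokens : List String) (out : List String) : Prop := out = merge_parenthesis_tokens_alt tokens
instance (tokens : List String) (out : List String) : Decidable (Spec_merge_parenthesis_tokens tokens out) := by unfold Spec_merge_parenthesis_tokens; infer_instance

-- ===== CLAIM (what is proved, stated in full; the proofs are below) =====
def Claim_equal_merge_parenthesis_tokens : Prop := ∀ (tokens : List String), Dom_merge_parenthesis_tokens tokens → Pre_merge_parenthesis_tokens tokens → Spec_merge_parenthesis_tokens tokens (merge_parenthesis_tokens tokens)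

-- ===== LEMMAS AND PROOFS =====

-- A's test t[0] == '(' coincides with B's t.startswith('(') (both are False on the empty string).
theorem pvStarts_iff (t : String) :
    PySem.Str.pyGet? t 0 = some '(' ↔ PySem.Str.startswith t "(" = true := by
  simp only [PySem.Str.startswith_eq, PySem.Str.pyGet?_eq, PySem.Chars.pyGet?_eq_listPyGet?,
    PySem.List.pyGet?_zero]
  rw [PySem.Chars.startswith_iff]
  show _ ↔ ['('] <+: t.toList
  cases t.toList with
  | nil => simp
  | cons c l => simp [List.cons_prefix_cons, eq_comm]

-- A's test t[-1] == ')' coincides with B's t.endswith(')').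
theorem pvEnds_iff (t : String) :
    PySem.Str.pyGet? t (-1) = some ')' ↔ PySem.Str.endswith t ")" = true := by
  simp only [PySem.Str.endswith_eq, PySem.Str.pyGet?_eq, PySem.Chars.pyGet?_eq_listPyGet?,
    PySem.List.pyGet?_neg_one]
  rw [PySem.Chars.endswith_iff]
  show _ ↔ [')'] <:+ t.toList
  rw [List.getLast?_eq_some_iff]
  constructor
  · rintro ⟨l, h⟩; exact ⟨l, h.symm⟩
  · rintro ⟨l, h⟩; exact ⟨l, h.symm⟩

-- B's ' '.join over a span equals A's left-to-right holder accumulation.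
theorem pvJoin_eq_foldl (t : String) (g : List String) :
    PySem.Str.join " " (t :: g) = g.foldl (fun a b => a ++ " " ++ b) t := by
  induction g generalizing t with
  | nil =>
    apply String.ext
    simp [PySem.Str.toList_join, PySem.Chars.join_singleton]
  | cons b g ih =>
    show _ = List.foldl _ (t ++ " " ++ b) g
    rw [← ih (t ++ " " ++ b)]
    apply String.ext
    cases g with
    | nil => simp [PySem.Str.toList_join, PySem.Chars.join_singleton, PySem.Chars.join_cons_cons]
    | cons c gs => simp [PySem.Str.toList_join, PySem.Chars.join_cons_cons]

-- what A's loop yields from holder state h, phrased from B's pieces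
def pvHolderRes (h : String) (ts : List String) : List String :=
  match pvSplitClose ts with
  | some (g, rest) => (g.foldl (fun a b => a ++ " " ++ b) h) :: pvGoB rest
  | none => []

-- the loop invariant tying A's two holder states to B's look-ahead
theorem pvGo_eq (ts : List String) :
    (∀ res, pvGoA ts none res = res ++ pvGoB ts) ∧
    (∀ h res, pvGoA ts (some h) res = res ++ pvHolderRes h ts) := by
  induction ts with
  | nil =>
    constructor
    · intro res; simp [pvGoA, pvGoB]
    · intro h res; simp [pvGoA, pvHolderRes, pvSplitClose]
  | cons t ts ih =>
    constructor
    · intro res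
      by_cases hc : PySem.Str.startswith t "(" = true ∧ ¬ PySem.Str.endswith t ")" = true
      · have hca : PySem.Str.pyGet? t 0 = some '(' ∧ ¬ PySem.Str.pyGet? t (-1) = some ')' :=
          ⟨(pvStarts_iff t).mpr hc.1, fun h => hc.2 ((pvEnds_iff t).mp h)⟩
        rw [show pvGoA (t :: ts) none res = pvGoA ts (some t) res by
          simp only [pvGoA]; rw [if_pos hca]]
        rw [ih.2 t res]
        congr 1
        rw [pvGoB, if_pos hc]
        unfold pvHolderRes
        cases hs : pvSplitClose ts with
        | none => simp
        | some p => simp [pvJoin_eq_foldl]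
      · have hca : ¬ (PySem.Str.pyGet? t 0 = some '(' ∧ ¬ PySem.Str.pyGet? t (-1) = some ')') := by
          intro ⟨h1, h2⟩
          exact hc ⟨(pvStarts_iff t).mp h1, fun h => h2 ((pvEnds_iff t).mpr h)⟩
        rw [show pvGoA (t :: ts) none res = pvGoA ts none (res ++ [t]) by
          simp only [pvGoA]; rw [if_neg hca]]
        rw [ih.1 (res ++ [t])]
        rw [pvGoB, if_neg hc]
        simp
    · intro h res
      by_cases hc : PySem.Str.endswith t ")" = true
      · rw [show pvGoA (t :: ts) (some h) res = pvGoA ts none (res ++ [h ++ " " ++ t]) by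
          simp only [pvGoA]; rw [if_pos ((pvEnds_iff t).mpr hc)]]
        rw [ih.1 (res ++ [h ++ " " ++ t])]
        unfold pvHolderRes
        rw [show pvSplitClose (t :: ts) = some ([t], ts) by
          simp only [pvSplitClose]; rw [if_pos hc]]
        simp
      · rw [show pvGoA (t :: ts) (some h) res = pvGoA ts (some (h ++ " " ++ t)) res by
          simp only [pvGoA]; rw [if_neg (fun hh => hc ((pvEnds_iff t).mp hh))]]
        rw [ih.2 (h ++ " " ++ t) res]
        congr 1
        unfold pvHolderRes
        rw [show pvSplitClose (t :: ts) = (pvSplitClose ts).map (fun p => (t :: p.1, p.2)) by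
          simp only [pvSplitClose]; rw [if_neg hc]]
        cases hs : pvSplitClose ts with
        | none => simp
        | some p => simp [List.foldl_cons]

-- ===== VERDICT (by name: the statement is the Claim_ definition above) =====
theorem merge_parenthesis_tokens_spec : Claim_equal_merge_parenthesis_tokens := by
  intro tokens _ _
  unfold Spec_merge_parenthesis_tokens merge_parenthesis_tokens merge_parenthesis_tokens_alt
  simpa using (pvGo_eq tokens).1 []
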